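-- pv_equiv track=rewrite | github.com/amlabdr/TimeTag_custom_data | get_data_stream.py | subtract_WRtimestamps
-- ===== SOURCE A (Python) =====
-- def subtract_WRtimestamps(channel, timestamps, WRChannel):
--     # Initialize a variable to keep track of whether we're currently subtracting
--     subtracting = False
--     WR_timestamp = 0
--
--     for i in range(len(channel)):
--         if channel[i] == WRChannel:
--             # If we find a new WRChannel, start subtracting from the next timestamps
--             subtracting = True
--             WR_timestamp = timestamps[i]
--         elif subtracting:
--             # Subtract the WR_timestamp from the timestamps
--             timestamps[i] -= WR_timestamp
--
--     return timestamps
-- ===== SOURCE B (Python) =====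
-- def subtract_WRtimestamps(channel, timestamps, WRChannel):
--     # Segment-based rewrite: find all white-rabbit marker positions first, then
--     # subtract each marker's timestamp from its following segment.
--     # Like A, mutates `timestamps` in place and returns it.
--     wr = [i for i, c in enumerate(channel) if c == WRChannel]
--     for p, end in zip(wr, wr[1:] + [len(channel)]):
--         w = timestamps[p]
--         for j in range(p + 1, end):
--             timestamps[j] -= w
--     return timestamps
-- ===== Notes on version B (the rewrite author's own statement) =====
-- stated objective: alternative
-- what changed: Replaces the one-pass boolean carry-forward state machine by a two-phase index-then-segment algorithm: first collect all white-rabbit marker positions, then subtract each marker's timestamp from the segment of timestamps between it and the next marker.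
-- outside the precondition, e.g. on subtract_WRtimestamps([1, 0], [5], 1): A raises IndexError, B raises IndexError
import Mathlib
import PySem

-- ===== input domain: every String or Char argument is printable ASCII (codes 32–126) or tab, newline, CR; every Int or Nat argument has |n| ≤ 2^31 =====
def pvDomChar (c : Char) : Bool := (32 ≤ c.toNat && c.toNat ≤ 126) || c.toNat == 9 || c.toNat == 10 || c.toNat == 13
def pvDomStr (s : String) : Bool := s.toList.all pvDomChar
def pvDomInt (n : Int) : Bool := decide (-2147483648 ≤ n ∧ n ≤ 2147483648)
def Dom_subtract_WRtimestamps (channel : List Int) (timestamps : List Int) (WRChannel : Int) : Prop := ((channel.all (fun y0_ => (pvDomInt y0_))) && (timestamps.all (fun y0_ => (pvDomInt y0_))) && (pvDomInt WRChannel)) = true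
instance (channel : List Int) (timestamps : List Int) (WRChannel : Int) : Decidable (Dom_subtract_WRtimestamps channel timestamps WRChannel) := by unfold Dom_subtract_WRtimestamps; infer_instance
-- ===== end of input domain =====

-- B replaces A's one-pass boolean carry-forward loop by a two-phase algorithm
-- (collect marker positions, then subtract per segment); same cost, return-value
-- equivalence is proved (both Pythons also mutate `timestamps` in place alike).

-- ===== PORT A =====
-- loop body of A's single for-loop over range(len(channel)); state = (subtracting, WR_timestamp, timestamps)
def stepA (channel : List Int) (WRChannel : Int) (st : Bool × Int × List Int) (i : Int) : Bool × Int × List Int :=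
  if PySem.List.pyGetD channel i 0 = WRChannel then
    (true, PySem.List.pyGetD st.2.2 i 0, st.2.2)
  else if st.1 = true then
    (st.1, st.2.1, st.2.2.set i.toNat (PySem.List.pyGetD st.2.2 i 0 - st.2.1))
  else st

def subtract_WRtimestamps (channel : List Int) (timestamps : List Int) (WRChannel : Int) : List Int :=
  ((PySem.List.pyRange 0 (channel.length : Int) 1).foldl (stepA channel WRChannel)
    (false, 0, timestamps)).2.2

-- ===== PORT B =====
-- inner loop of B: for j in range(a, b): timestamps[j] -= w
def segSub (ts : List Int) (w : Int) (a b : Int) : List Int :=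
  (PySem.List.pyRange a b 1).foldl (fun t j => t.set j.toNat (PySem.List.pyGetD t j 0 - w)) ts

def subtract_WRtimestamps_alt (channel : List Int) (timestamps : List Int) (WRChannel : Int) : List Int :=
  let wr := (PySem.List.enumerate channel 0).filterMap
    (fun ic => if ic.2 = WRChannel then some ic.1 else none)
  (wr.zip (wr.drop 1 ++ [(channel.length : Int)])).foldl
    (fun ts pe => segSub ts (PySem.List.pyGetD ts pe.1 0) (pe.1 + 1) pe.2) timestamps

-- ===== PRECONDITION & SPEC =====
-- Pre_ excludes exactly the inputs where Python A raises IndexError: timestamps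
-- shorter than channel while the marker occurs in channel (B raises there too).
def Pre_subtract_WRtimestamps (channel : List Int) (timestamps : List Int) (WRChannel : Int) : Prop :=
  timestamps.length < channel.length → WRChannel ∉ channel

instance (channel : List Int) (timestamps : List Int) (WRChannel : Int) : Decidable (Pre_subtract_WRtimestamps channel timestamps WRChannel) := by unfold Pre_subtract_WRtimestamps; infer_instance

def pvWitness_subtract_WRtimestamps : List Int × List Int × Int := ([2, 1, 3, 1, 2], [4, 10, 17, 30, 35], 1)

def Spec_subtract_WRtimestamps (channel : List Int) (timestamps : List Int) (WRChannel : Int) (out : List Int) : Prop := out = subtract_WRtimestamps_alt channel timestamps WRChannel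
instance (channel : List Int) (timestamps : List Int) (WRChannel : Int) (out : List Int) : Decidable (Spec_subtract_WRtimestamps channel timestamps WRChannel out) := by unfold Spec_subtract_WRtimestamps; infer_instance

-- ===== CLAIM (what is proved, stated in full; the proofs are below) =====
def Claim_equal_subtract_WRtimestamps : Prop := ∀ (channel : List Int) (timestamps : List Int) (WRChannel : Int), Dom_subtract_WRtimestamps channel timestamps WRChannel → Pre_subtract_WRtimestamps channel timestamps WRChannel → Spec_subtract_WRtimestamps channel timestamps WRChannel (subtract_WRtimestamps channel timestamps WRChannel)

-- ===== LEMMAS AND PROOFS =====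
-- (the two ports are in fact equal on ALL inputs; Pre_ is only about Python exceptions)

-- marker positions at index ≥ i
def wrF (channel : List Int) (WRChannel : Int) (i : Int) : List Int :=
  (PySem.List.pyRange i (channel.length : Int) 1).filter
    (fun j => PySem.List.pyGetD channel j 0 == WRChannel)

-- pair each marker position with the start of the next segment
def pairs (n : Int) (l : List Int) : List (Int × Int) := l.zip (l.drop 1 ++ [n])

def foldB (ts : List Int) (l : List (Int × Int)) : List Int :=
  l.foldl (fun ts pe => segSub ts (PySem.List.pyGetD ts pe.1 0) (pe.1 + 1) pe.2) ts

theorem segSub_nil (ts : List Int) (w : Int) (a b : Int) (h : b ≤ a) : segSub ts w a b = ts := by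
  unfold segSub
  rw [PySem.List.pyRange_one_eq_nil h]
  rfl

theorem foldB_cons (ts : List Int) (p e : Int) (l : List (Int × Int)) :
    foldB ts ((p, e) :: l) = foldB (segSub ts (PySem.List.pyGetD ts p 0) (p + 1) e) l := rfl

theorem pairs_cons (n : Int) (p : Int) (rest : List Int) :
    pairs n (p :: rest) = (p, rest.headD n) :: pairs n rest := by
  cases rest <;> simp [pairs]

theorem wrF_ge (channel : List Int) (WRChannel : Int) (i x : Int)
    (hx : x ∈ wrF channel WRChannel i) : i ≤ x := by
  unfold wrF at hx
  have := List.mem_of_mem_filter hx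
  exact (PySem.List.mem_pyRange_one.mp this).1

theorem wrF_cons (channel : List Int) (WRChannel : Int) (i : Int)
    (hi : i < (channel.length : Int)) :
    wrF channel WRChannel i =
      (if PySem.List.pyGetD channel i 0 == WRChannel then [i] else []) ++ wrF channel WRChannel (i + 1) := by
  unfold wrF
  rw [PySem.List.pyRange_one_cons hi]
  by_cases h : PySem.List.pyGetD channel i 0 == WRChannel <;> simp [h]

def procT (channel : List Int) (WRChannel : Int) (w : Int) (i : Int) (ts : List Int) : List Int :=
  foldB (segSub ts w i ((wrF channel WRChannel i).headD (channel.length : Int)))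
    (pairs (channel.length : Int) (wrF channel WRChannel i))

theorem headD_wrF_ge (channel : List Int) (WRChannel : Int) (i : Int)
    (hi : i < (channel.length : Int)) :
    i + 1 ≤ (wrF channel WRChannel (i + 1)).headD (channel.length : Int) := by
  cases h : wrF channel WRChannel (i + 1) with
  | nil => simpa using hi
  | cons x l =>
      have : x ∈ wrF channel WRChannel (i + 1) := by rw [h]; exact List.mem_cons_self
      simpa using wrF_ge channel WRChannel (i + 1) x this

theorem loopT (channel : List Int) (WRChannel : Int) :
    ∀ (m : Nat) (i w : Int) (ts : List Int), i + (m : Int) = (channel.length : Int) →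
    ((PySem.List.pyRange i (channel.length : Int) 1).foldl (stepA channel WRChannel) (true, w, ts)).2.2
      = procT channel WRChannel w i ts := by
  intro m
  induction m with
  | zero =>
      intro i w ts h
      simp at h
      subst h
      rw [PySem.List.pyRange_one_eq_nil le_rfl]
      unfold procT wrF
      rw [PySem.List.pyRange_one_eq_nil le_rfl]
      simp [foldB, pairs, segSub, PySem.List.pyRange_one_eq_nil le_rfl]
  | succ m ih =>
      intro i w ts h
      have hi : i < (channel.length : Int) := by omega
      rw [PySem.List.pyRange_one_cons hi]
      simp only [List.foldl_cons]
      by_cases hwr : PySem.List.pyGetD channel i 0 = WRChannel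
      · have hstep : stepA channel WRChannel (true, w, ts) i = (true, PySem.List.pyGetD ts i 0, ts) := by
          simp [stepA, hwr]
        rw [hstep, ih (i + 1) _ ts (by omega)]
        unfold procT
        rw [wrF_cons channel WRChannel i hi]
        simp only [hwr, beq_self_eq_true, if_true, List.singleton_append, pairs_cons,
          List.headD_cons]
        rw [segSub_nil ts w i i le_rfl, foldB_cons]
      · have hstep : stepA channel WRChannel (true, w, ts) i
            = (true, w, ts.set i.toNat (PySem.List.pyGetD ts i 0 - w)) := by
          simp [stepA, hwr]
        rw [hstep, ih (i + 1) w _ (by omega)]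
        unfold procT
        rw [wrF_cons channel WRChannel i hi]
        simp only [hwr, beq_iff_eq, if_false, List.nil_append]
        have he : i + 1 ≤ (wrF channel WRChannel (i + 1)).headD (channel.length : Int) :=
          headD_wrF_ge channel WRChannel i hi
        have hseg : segSub ts w i ((wrF channel WRChannel (i + 1)).headD (channel.length : Int))
            = segSub (ts.set i.toNat (PySem.List.pyGetD ts i 0 - w)) w (i + 1)
                ((wrF channel WRChannel (i + 1)).headD (channel.length : Int)) := by
          unfold segSub
          rw [PySem.List.pyRange_one_cons (by omega)]
          simp
        rw [hseg]

theorem loopF (channel : List Int) (WRChannel : Int) :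
    ∀ (m : Nat) (i w0 : Int) (ts : List Int), i + (m : Int) = (channel.length : Int) →
    ((PySem.List.pyRange i (channel.length : Int) 1).foldl (stepA channel WRChannel) (false, w0, ts)).2.2
      = foldB ts (pairs (channel.length : Int) (wrF channel WRChannel i)) := by
  intro m
  induction m with
  | zero =>
      intro i w0 ts h
      simp at h
      subst h
      rw [PySem.List.pyRange_one_eq_nil le_rfl]
      unfold wrF
      rw [PySem.List.pyRange_one_eq_nil le_rfl]
      simp [foldB, pairs]
  | succ m ih =>
      intro i w0 ts h
      have hi : i < (channel.length : Int) := by omega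
      rw [PySem.List.pyRange_one_cons hi]
      simp only [List.foldl_cons]
      by_cases hwr : PySem.List.pyGetD channel i 0 = WRChannel
      · have hstep : stepA channel WRChannel (false, w0, ts) i = (true, PySem.List.pyGetD ts i 0, ts) := by
          simp [stepA, hwr]
        rw [hstep, loopT channel WRChannel m (i + 1) _ ts (by omega)]
        unfold procT
        rw [wrF_cons channel WRChannel i hi]
        simp only [hwr, beq_self_eq_true, if_true, List.singleton_append, pairs_cons]
        rw [foldB_cons]
      · have hstep : stepA channel WRChannel (false, w0, ts) i = (false, w0, ts) := by
          simp [stepA, hwr]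
        rw [hstep, ih (i + 1) w0 ts (by omega)]
        rw [wrF_cons channel WRChannel i hi]
        simp [hwr]

theorem filterMap_enumerate_eq_wrF (channel : List Int) (WRChannel : Int) :
    (PySem.List.enumerate channel 0).filterMap
      (fun ic => if ic.2 = WRChannel then some ic.1 else none)
      = wrF channel WRChannel 0 := by
  have gen : ∀ (l : List Int),
      l.filterMap ((fun ic : Int × Int => if ic.2 = WRChannel then some ic.1 else none)
          ∘ fun j => (j, PySem.List.pyGetD channel j 0))
        = l.filter (fun j => PySem.List.pyGetD channel j 0 == WRChannel) := by
    intro l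
    induction l with
    | nil => rfl
    | cons x l ihl =>
        simp only [List.filterMap_cons, List.filter_cons, Function.comp]
        by_cases h : PySem.List.pyGetD channel x 0 = WRChannel <;>
          (simp [h]; exact ihl)
  rw [PySem.List.enumerate_eq_map_pyRange (d := 0), List.filterMap_map, gen]
  unfold wrF
  simp [PySem.List.len]

theorem ports_eq (channel : List Int) (timestamps : List Int) (WRChannel : Int) :
    subtract_WRtimestamps channel timestamps WRChannel
      = subtract_WRtimestamps_alt channel timestamps WRChannel := by
  unfold subtract_WRtimestamps subtract_WRtimestamps_alt
  rw [loopF channel WRChannel channel.length 0 0 timestamps (by omega)]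
  rw [filterMap_enumerate_eq_wrF]
  rfl

-- ===== VERDICT (by name: the statement is the Claim_ definition above) =====
theorem subtract_WRtimestamps_spec : Claim_equal_subtract_WRtimestamps := by
  intro channel timestamps WRChannel _ _
  exact ports_eq channel timestamps WRChannel
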